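-- pv_equiv track=rewrite | github.com/amadeusine/ChimeraX | src/hydra/commands.py | abbreviation_table
-- ===== SOURCE A (Python) =====
-- def abbreviation_table(names, lowercase = True):
--
--     a = {}
--     for name in names:
--         for i in range(1,len(name)+1):
--             aname = name[:i]
--             if lowercase:
--                 aname = aname.lower()
--             if aname in a:
--                 a[aname].append(name)
--             else:
--                 a[aname] = [name]
--     # Delete non-unique abbreviations except in case where shortest name
--     # is a prefix of all names that have that abbreviation.
--     for n,v in tuple(a.items()):
--         shortest = min(v, key = lambda s: len(s))
--         for fn in v:
--             if not fn.startswith(shortest):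
--                 del a[n]
--                 break
--         if n in a:
--             a[n] = shortest
--     return a
-- ===== SOURCE B (Python) =====
-- def abbreviation_table(names, lowercase = True):
--     # One streaming pass: for every (normalised) prefix keep only the shortest
--     # name seen so far (first-seen wins ties), never a list of names.
--     shortest = {}
--     for name in names:
--         nn = name.lower() if lowercase else name
--         for i in range(1, len(nn) + 1):
--             p = nn[:i]
--             s = shortest.get(p)
--             if s is None:
--                 shortest[p] = name
--             elif len(name) < len(s):
--                 shortest[p] = name
--     # Second sweep: a prefix is bad when some name it abbreviates does not
--     # start with that prefix's shortest name.
--     bad = set()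
--     for name in names:
--         nn = name.lower() if lowercase else name
--         for i in range(1, len(nn) + 1):
--             p = nn[:i]
--             if not name.startswith(shortest[p]):
--                 bad.add(p)
--     return {p: s for p, s in shortest.items() if p not in bad}
-- ===== Notes on version B (the rewrite author's own statement) =====
-- stated objective: alternative
-- what changed: B never stores per-prefix name lists: instead of A's dict of lists followed by a destructive min/startswith filtering pass over a snapshot of that dict, B streams the shortest name per prefix in one pass, collects failing prefixes into a bad-key set with a second startswith sweep, and emits the table as a comprehension.
import Mathlib
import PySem

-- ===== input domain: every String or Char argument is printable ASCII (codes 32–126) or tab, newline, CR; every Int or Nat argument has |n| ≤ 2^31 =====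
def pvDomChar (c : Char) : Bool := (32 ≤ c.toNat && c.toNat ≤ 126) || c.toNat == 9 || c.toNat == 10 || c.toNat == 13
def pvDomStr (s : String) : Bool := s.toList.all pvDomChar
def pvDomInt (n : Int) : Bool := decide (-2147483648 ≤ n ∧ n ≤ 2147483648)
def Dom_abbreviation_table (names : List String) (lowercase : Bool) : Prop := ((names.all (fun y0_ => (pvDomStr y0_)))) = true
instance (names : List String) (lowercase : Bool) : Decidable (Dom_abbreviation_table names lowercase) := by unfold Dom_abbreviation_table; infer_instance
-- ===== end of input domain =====

-- B replaces A's dict of per-prefix name LISTS (grouping pass + destructive min/startswith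
-- filtering pass over a snapshot of the dict) by a streaming shortest-name-per-prefix dict, a
-- second startswith sweep collecting bad keys into a set, and a final comprehension; objective:
-- alternative (same result and cost, no name lists stored, no mutation while iterating).

-- ===== PORT A =====
-- Python's dict holds lists of names during the first loop and strings after the second:
-- modelled with the sum type `List String ⊕ String`.
def abbreviation_table (names : List String) (lowercase : Bool) : List (String × String) :=
  let a : PySem.Dict String (List String ⊕ String) :=
    names.foldl (fun a name =>
      (PySem.List.pyRange 1 (PySem.Str.len name + 1) 1).foldl (fun a i =>
        let aname := PySem.Str.slice name none (some i)
        let aname := if lowercase then PySem.Str.lower aname else aname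
        if a.contains aname then
          a.modify aname (Sum.inl []) (fun v => match v with
            | Sum.inl l => Sum.inl (l ++ [name])
            | Sum.inr s => Sum.inr s)
        else a.insert aname (Sum.inl [name])) a) PySem.Dict.empty
  let a :=
    a.items.foldl (fun (a : PySem.Dict String (List String ⊕ String)) nv =>
      match nv.2 with
      | Sum.inr _ => a   -- unreachable: every value in the iterated snapshot is a list
      | Sum.inl v =>
        -- v is nonempty by construction, so Python's `min` never raises; `.getD ""` is never used
        let shortest := (PySem.List.min? v (fun s => PySem.Str.len s)).getD ""
        -- the for/break loop's only effect is a single `del`, performed iff some fn fails the test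
        if v.any (fun fn => ! PySem.Str.startswith fn shortest) then a.erase nv.1
        else if a.contains nv.1 then a.insert nv.1 (Sum.inr shortest) else a) a
  -- returned dict[str, str]: after the second loop every remaining value is a string,
  -- so this filterMap is exactly the type-convention reading of the returned dict
  a.items.filterMap (fun p => match p.2 with | Sum.inl _ => none | Sum.inr s => some (p.1, s))

-- ===== PORT B =====
def abbreviation_table_alt (names : List String) (lowercase : Bool) : List (String × String) :=
  let shortest : PySem.Dict String String :=
    names.foldl (fun shortest name =>
      let nn := if lowercase then PySem.Str.lower name else name
      (PySem.List.pyRange 1 (PySem.Str.len nn + 1) 1).foldl (fun shortest i =>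
        let p := PySem.Str.slice nn none (some i)
        match shortest.get? p with
        | none => shortest.insert p name
        | some s =>
          if PySem.Str.len name < PySem.Str.len s then shortest.insert p name
          else shortest) shortest) PySem.Dict.empty
  let bad : PySem.Set String :=
    names.foldl (fun bad name =>
      let nn := if lowercase then PySem.Str.lower name else name
      (PySem.List.pyRange 1 (PySem.Str.len nn + 1) 1).foldl (fun bad i =>
        let p := PySem.Str.slice nn none (some i)
        -- `shortest[p]` always exists here (p was inserted in the first loop),
        -- so `(get? …).getD ""` is exactly Python's `shortest[p]` on this domain
        if ! PySem.Str.startswith name ((shortest.get? p).getD "") then PySem.Set.add bad p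
        else bad) bad) (PySem.Set.ofList [])
  -- the dict comprehension: rebuild the dict in items order, skipping bad keys
  (shortest.items.foldl (fun (t : PySem.Dict String String) kv =>
      if kv.1 ∈ bad then t else t.insert kv.1 kv.2) PySem.Dict.empty).items

-- ===== PRECONDITION & SPEC =====
def Spec_abbreviation_table (names : List String) (lowercase : Bool) (out : List (String × String)) : Prop := out = abbreviation_table_alt names lowercase
instance (names : List String) (lowercase : Bool) (out : List (String × String)) : Decidable (Spec_abbreviation_table names lowercase out) := by unfold Spec_abbreviation_table; infer_instance

-- ===== CLAIM (what is proved, stated in full; the proofs are below) =====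
def Claim_equal_abbreviation_table : Prop := ∀ (names : List String) (lowercase : Bool), Dom_abbreviation_table names lowercase → Spec_abbreviation_table names lowercase (abbreviation_table names lowercase)

-- ===== LEMMAS AND PROOFS =====

-- normalisation applied to a name before the prefix test
def pvNorm (lc : Bool) (n : String) : String := if lc then PySem.Str.lower n else n

-- "name n belongs to abbreviation key k"
def pvMatch (lc : Bool) (k n : String) : Bool := PySem.Str.startswith (pvNorm lc n) k

-- the (normalised) nonempty prefixes of a name, shortest first
def pvPrefs (lc : Bool) (name : String) : List String :=
  (PySem.List.pyRange 1 (PySem.Str.len name + 1) 1).map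
    (fun i => PySem.Str.slice (pvNorm lc name) none (some i))

-- A's first-loop inner step, per prefix
def pvStepA (name : String) (a : PySem.Dict String (List String ⊕ String)) (p : String) :
    PySem.Dict String (List String ⊕ String) :=
  if a.contains p then
    a.modify p (Sum.inl []) (fun v => match v with
      | Sum.inl l => Sum.inl (l ++ [name])
      | Sum.inr s => Sum.inr s)
  else a.insert p (Sum.inl [name])

-- B's key-collection step, per prefix
def pvAdd (ks : List String) (p : String) : List String := if p ∈ ks then ks else ks ++ [p]

-- B's key list after processing `rest`, starting from `K`
def pvKeys (lc : Bool) (rest : List String) (K : List String) : List String :=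
  rest.foldl (fun ks name => (pvPrefs lc name).foldl pvAdd ks) K

-- A's second-loop step
def pvStep2 (a : PySem.Dict String (List String ⊕ String)) (nv : String × (List String ⊕ String)) :
    PySem.Dict String (List String ⊕ String) :=
  match nv.2 with
  | Sum.inr _ => a
  | Sum.inl v =>
    let shortest := (PySem.List.min? v (fun s => PySem.Str.len s)).getD ""
    if v.any (fun fn => ! PySem.Str.startswith fn shortest) then a.erase nv.1
    else if a.contains nv.1 then a.insert nv.1 (Sum.inr shortest) else a

-- what A's second loop turns one snapshot entry into
def pvTr (nv : String × (List String ⊕ String)) : List (String × (List String ⊕ String)) :=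
  match nv.2 with
  | Sum.inr s => [(nv.1, Sum.inr s)]
  | Sum.inl v =>
    let shortest := (PySem.List.min? v (fun s => PySem.Str.len s)).getD ""
    if v.any (fun fn => ! PySem.Str.startswith fn shortest) then []
    else [(nv.1, Sum.inr shortest)]

lemma pv_len_norm (lc : Bool) (n : String) : PySem.Str.len (pvNorm lc n) = PySem.Str.len n := by
  cases lc <;> simp [pvNorm, PySem.Str.len, PySem.Str.lower, PySem.Chars.lower]


lemma pv_slice_lower_comm (s : String) (i : Int) (hi : 0 ≤ i) :
    PySem.Str.slice (PySem.Str.lower s) none (some i)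
      = PySem.Str.lower (PySem.Str.slice s none (some i)) := by
  rw [← String.toList_inj]
  simp [PySem.Str.slice, PySem.Str.lower, PySem.Chars.lower,
    PySem.List.slice_to _ hi, List.map_take]


lemma pv_toList_norm_len (lc : Bool) (n : String) :
    ((pvNorm lc n).toList).length = n.toList.length := by
  have := pv_len_norm lc n
  simpa [PySem.Str.len] using this

lemma pv_mem_pvPrefs (lc : Bool) (name k : String) :
    k ∈ pvPrefs lc name ↔ (k ≠ "" ∧ pvMatch lc k name = true) := by
  constructor
  · rintro hk
    simp only [pvPrefs, List.mem_map] at hk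
    obtain ⟨i, hi, rfl⟩ := hk
    rw [PySem.List.mem_pyRange_one] at hi
    have h0 : (0:Int) ≤ i := by omega
    have hslice : (PySem.Str.slice (pvNorm lc name) none (some i)).toList
        = (pvNorm lc name).toList.take i.toNat := by
      simp [PySem.Str.slice, PySem.List.slice_to _ h0]
    constructor
    · intro he
      have : (PySem.Str.slice (pvNorm lc name) none (some i)).toList = [] := by
        rw [he]; rfl
      rw [hslice] at this
      have hlen : i.toNat ≤ (pvNorm lc name).toList.length := by
        have := pv_toList_norm_len lc name
        simp only [PySem.Str.len] at hi
        omega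
      rcases List.take_eq_nil_iff.mp this with h | h
      · omega
      · rw [h] at hlen
        simp at hlen
        omega
    · simp only [pvMatch, PySem.Str.startswith, PySem.Chars.startswith_iff]
      rw [hslice]
      exact List.take_prefix _ _
  · rintro ⟨hne, hm⟩
    simp only [pvMatch, PySem.Str.startswith, PySem.Chars.startswith_iff] at hm
    simp only [pvPrefs, List.mem_map]
    refine ⟨(k.toList.length : Int), ?_, ?_⟩
    · rw [PySem.List.mem_pyRange_one]
      have hle := hm.length_le
      have hk0 : k.toList ≠ [] := by
        intro h; apply hne; rw [← String.toList_inj]; simpa using h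
      have : 0 < k.toList.length := List.length_pos_iff.mpr hk0
      have := pv_toList_norm_len lc name
      simp only [PySem.Str.len]
      omega
    · rw [← String.toList_inj]
      have h0 : (0:Int) ≤ (k.toList.length : Int) := by positivity
      simp [PySem.Str.slice, PySem.List.slice_to _ h0]
      exact (List.prefix_iff_eq_take.mp hm).symm


lemma pv_nodup_pvPrefs (lc : Bool) (name : String) : (pvPrefs lc name).Nodup := by
  refine List.Nodup.map_on ?_ (PySem.List.nodup_pyRange_one _ _)
  intro i hi j hj hij
  rw [PySem.List.mem_pyRange_one] at hi hj
  have h0i : (0:Int) ≤ i := by omega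
  have h0j : (0:Int) ≤ j := by omega
  have hL := pv_toList_norm_len lc name
  simp only [PySem.Str.len] at hi hj
  have := congrArg (fun s => s.toList.length) hij
  simp only [PySem.Str.slice, PySem.Chars.slice_eq_listSlice, PySem.List.slice_to _ h0i,
    PySem.List.slice_to _ h0j, String.toList_ofList, List.length_take] at this
  omega


lemma pv_keys_mk_map {β : Type} (K : List String) (g : String → β) :
    (PySem.Dict.mk (K.map (fun k => (k, g k)))).keys = K := by
  simp [PySem.Dict.keys, List.map_map, Function.comp_def]


lemma pv_contains_mk_map {β : Type} (K : List String) (g : String → β) (p : String) :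
    (PySem.Dict.mk (K.map (fun k => (k, g k)))).contains p = decide (p ∈ K) := by
  simp only [PySem.Dict.contains, List.any_map, Function.comp_def]
  rcases Decidable.em (p ∈ K) with h | h
  · simp only [decide_eq_true h]
    rw [List.any_eq_true]
    exact ⟨p, h, by simp⟩
  · simp only [decide_eq_false h]
    rw [List.any_eq_false]
    intro x hx
    simp only [beq_iff_eq]
    intro he; exact h (he ▸ hx)


-- inner loop of A's first phase over the prefix list of one name
lemma pv_getD_mk_map {β : Type} (K : List String) (g : String → β) (p : String) (hp : p ∈ K)
    (hnd : K.Nodup) (d0 : β) :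
    (PySem.Dict.mk (K.map (fun k => (k, g k)))).getD p d0 = g p := by
  apply PySem.Dict.getD_of_mem_items
  · exact List.mem_map.mpr ⟨p, hp, rfl⟩
  · rw [pv_keys_mk_map]; exact hnd

lemma pv_inner (name : String) : ∀ (ps K : List String) (vals : String → List String),
    ps.Nodup → K.Nodup →
    List.foldl (pvStepA name)
        (PySem.Dict.mk (K.map (fun k => (k, Sum.inl (vals k))))) ps
      = PySem.Dict.mk ((K ++ ps.filter (fun p => p ∉ K)).map (fun k =>
          (k, Sum.inl (if k ∈ ps then (if k ∈ K then vals k ++ [name] else [name]) else vals k)))) := by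
  intro ps
  induction ps with
  | nil => intro K vals _ _; simp
  | cons p ps ih =>
    intro K vals hnd hK
    have hpps : p ∉ ps := (List.nodup_cons.mp hnd).1
    have hps : ps.Nodup := (List.nodup_cons.mp hnd).2
    rw [List.foldl_cons]
    by_cases hpK : p ∈ K
    · have hc : (PySem.Dict.mk (K.map (fun k => (k, (Sum.inl (vals k) : List String ⊕ String)))) ).contains p = true := by
        rw [pv_contains_mk_map]; exact decide_eq_true hpK
      have hstep : pvStepA name (PySem.Dict.mk (K.map (fun k => (k, Sum.inl (vals k))))) p
          = PySem.Dict.mk (K.map (fun k =>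
              (k, Sum.inl (if k = p then vals k ++ [name] else vals k)))) := by
        rw [pvStepA, if_pos hc, PySem.Dict.modify,
          pv_getD_mk_map K _ p hpK hK]
        rw [PySem.Dict.insert, if_pos hc]
        congr 1
        rw [List.map_map]
        apply List.map_congr_left
        intro k hk
        by_cases hkp : k = p
        · subst hkp; simp
        · simp [hkp, Ne.symm hkp]
      rw [hstep, ih K _ hps hK]
      congr 1
      have hfil : (List.filter (fun q => decide (q ∉ K)) (p :: ps))
          = List.filter (fun q => decide (q ∉ K)) ps := by
        rw [List.filter_cons]
        simp [hpK]
      rw [hfil]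
      apply List.map_congr_left
      intro k hk
      by_cases hkp : k = p
      · subst hkp
        simp [hpps, hpK]
      · simp only [List.mem_cons, hkp, false_or]
        by_cases hkps : k ∈ ps <;> simp [hkps, hkp]
    · have hc : (PySem.Dict.mk (K.map (fun k => (k, (Sum.inl (vals k) : List String ⊕ String)))) ).contains p = false := by
        rw [pv_contains_mk_map]; exact decide_eq_false hpK
      have hKp : (K ++ [p]).Nodup := by
        rw [List.nodup_append]
        refine ⟨hK, List.nodup_singleton p, ?_⟩
        intro a ha b hb
        simp only [List.mem_singleton] at hb
        subst hb
        exact fun h => hpK (h ▸ ha)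
      have hstep : pvStepA name (PySem.Dict.mk (K.map (fun k => (k, Sum.inl (vals k))))) p
          = PySem.Dict.mk ((K ++ [p]).map (fun k =>
              (k, Sum.inl (if k = p then [name] else vals k)))) := by
        rw [pvStepA, if_neg (by simp [hc]), PySem.Dict.insert, if_neg (by simp [hc])]
        congr 1
        rw [List.map_append]
        congr 1
        · apply List.map_congr_left
          intro k hk
          have : k ≠ p := fun h => hpK (h ▸ hk)
          simp [this]
        · simp
      rw [hstep, ih (K ++ [p]) _ hps hKp]
      congr 1
      have hfil : (List.filter (fun q => decide (q ∉ K)) (p :: ps))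
          = p :: List.filter (fun q => decide (q ∉ K)) ps := by
        rw [List.filter_cons]
        simp [hpK]
      have hfil2 : List.filter (fun q => decide (q ∉ K ++ [p])) ps
          = List.filter (fun q => decide (q ∉ K)) ps := by
        apply List.filter_congr
        intro q hq
        have : q ≠ p := fun h => hpps (h ▸ hq)
        simp [this]
      rw [hfil, hfil2, List.append_assoc, List.singleton_append]
      apply List.map_congr_left
      intro k hk
      by_cases hkp : k = p
      · subst hkp
        simp [hpps, hpK]
      · have hkK : (k ∈ K ++ [p]) ↔ k ∈ K := by simp [hkp]
        simp only [List.mem_cons, hkp, false_or, hkK]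
        by_cases hkps : k ∈ ps <;> simp [hkps, hkp]


-- B's key-collection inner loop in closed form
lemma pv_add_fold : ∀ (ps K : List String), ps.Nodup →
    List.foldl pvAdd K ps = K ++ ps.filter (fun p => p ∉ K) := by
  intro ps
  induction ps with
  | nil => intro K _; simp
  | cons p ps ih =>
    intro K hnd
    have hpps : p ∉ ps := (List.nodup_cons.mp hnd).1
    have hps : ps.Nodup := (List.nodup_cons.mp hnd).2
    rw [List.foldl_cons, List.filter_cons]
    by_cases hpK : p ∈ K
    · rw [pvAdd, if_pos hpK, ih K hps]
      simp [hpK]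
    · rw [pvAdd, if_neg hpK, ih (K ++ [p]) hps]
      have hfil2 : List.filter (fun q => decide (q ∉ K ++ [p])) ps
          = List.filter (fun q => decide (q ∉ K)) ps := by
        apply List.filter_congr
        intro q hq
        have : q ≠ p := fun h => hpps (h ▸ hq)
        simp [this]
      rw [hfil2]
      simp [hpK]


lemma pv_keys_invariant (lc : Bool) : ∀ (rest K : List String),
    K.Nodup → (∀ k ∈ K, k ≠ "") →
    (pvKeys lc rest K).Nodup ∧ (∀ k ∈ pvKeys lc rest K, k ≠ "") ∧
      ∀ k ∈ K, k ∈ pvKeys lc rest K := by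
  intro rest
  induction rest with
  | nil => intro K h1 h2; exact ⟨h1, h2, fun k hk => hk⟩
  | cons name rest ih =>
    intro K h1 h2
    have hstep : pvKeys lc (name :: rest) K = pvKeys lc rest (K ++ (pvPrefs lc name).filter (fun p => p ∉ K)) := by
      rw [pvKeys, List.foldl_cons, pv_add_fold _ _ (pv_nodup_pvPrefs lc name)]
      rfl
    have hKp : (K ++ (pvPrefs lc name).filter (fun p => p ∉ K)).Nodup := by
      rw [List.nodup_append]
      refine ⟨h1, List.Nodup.filter _ (pv_nodup_pvPrefs lc name), ?_⟩
      intro a ha b hb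
      rcases List.mem_filter.mp hb with ⟨_, hb2⟩
      intro he; subst he
      exact absurd ha (by simpa using hb2)
    have hne : ∀ k ∈ K ++ (pvPrefs lc name).filter (fun p => p ∉ K), k ≠ "" := by
      intro k hk
      rcases List.mem_append.mp hk with h | h
      · exact h2 k h
      · exact ((pv_mem_pvPrefs lc name k).mp (List.mem_filter.mp h).1).1
    rw [hstep]
    obtain ⟨a1, a2, a3⟩ := ih _ hKp hne
    exact ⟨a1, a2, fun k hk => a3 k (List.mem_append_left _ hk)⟩

-- outer loop of A's first phase: the dict is exactly "key ↦ names matching it so far"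
lemma pv_outer (lc : Bool) : ∀ (rest K done : List String),
    K.Nodup → (∀ k ∈ K, k ≠ "") →
    (∀ k, k ≠ "" → k ∉ K → ∀ n ∈ done, pvMatch lc k n = false) →
    List.foldl (fun a name => List.foldl (pvStepA name) a (pvPrefs lc name))
        (PySem.Dict.mk (K.map (fun k => (k, Sum.inl (done.filter (fun n => pvMatch lc k n)))))) rest
      = PySem.Dict.mk ((pvKeys lc rest K).map (fun k =>
          (k, Sum.inl ((done ++ rest).filter (fun n => pvMatch lc k n))))) := by
  intro rest
  induction rest with
  | nil => intro K done _ _ _; simp [pvKeys]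
  | cons name rest ih =>
    intro K done hK hKne hout
    rw [List.foldl_cons]
    rw [pv_inner name (pvPrefs lc name) K _ (pv_nodup_pvPrefs lc name) hK]
    have hstep : pvKeys lc (name :: rest) K = pvKeys lc rest (K ++ (pvPrefs lc name).filter (fun p => p ∉ K)) := by
      rw [pvKeys, List.foldl_cons, pv_add_fold _ _ (pv_nodup_pvPrefs lc name)]
      rfl
    rw [hstep]
    set K' := K ++ (pvPrefs lc name).filter (fun p => p ∉ K) with hK'
    have hKp : K'.Nodup := by
      rw [hK', List.nodup_append]
      refine ⟨hK, List.Nodup.filter _ (pv_nodup_pvPrefs lc name), ?_⟩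
      intro a ha b hb
      rcases List.mem_filter.mp hb with ⟨_, hb2⟩
      intro he; subst he
      exact absurd ha (by simpa using hb2)
    have hne : ∀ k ∈ K', k ≠ "" := by
      intro k hk
      rcases List.mem_append.mp hk with h | h
      · exact hKne k h
      · exact ((pv_mem_pvPrefs lc name k).mp (List.mem_filter.mp h).1).1
    have hout' : ∀ k, k ≠ "" → k ∉ K' → ∀ n ∈ done ++ [name], pvMatch lc k n = false := by
      intro k hkne hkK n hn
      have hkK0 : k ∉ K := fun h => hkK (List.mem_append_left _ h)
      rcases List.mem_append.mp hn with h | h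
      · exact hout k hkne hkK0 n h
      · simp only [List.mem_singleton] at h
        by_contra hm
        have hm' : pvMatch lc k name = true := by
          rw [← h]
          cases hx : pvMatch lc k n
          · exact absurd hx hm
          · rfl
        exact hkK (List.mem_append_right _ (List.mem_filter.mpr
          ⟨(pv_mem_pvPrefs lc name k).mpr ⟨hkne, hm'⟩, by simpa using hkK0⟩))
    have hvals : ∀ k ∈ K', (if k ∈ pvPrefs lc name then
          (if k ∈ K then done.filter (fun n => pvMatch lc k n) ++ [name] else [name])
          else done.filter (fun n => pvMatch lc k n))
        = (done ++ [name]).filter (fun n => pvMatch lc k n) := by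
      intro k hk
      rw [List.filter_append]
      by_cases hp : k ∈ pvPrefs lc name
      · have hm : pvMatch lc k name = true := ((pv_mem_pvPrefs lc name k).mp hp).2
        rw [if_pos hp]
        by_cases hkK : k ∈ K
        · simp [hkK, hm]
        · have hkne : k ≠ "" := ((pv_mem_pvPrefs lc name k).mp hp).1
          have hnil : done.filter (fun n => pvMatch lc k n) = [] := by
            rw [List.filter_eq_nil_iff]
            intro n hn
            simp [hout k hkne hkK n hn]
          simp [hkK, hm, hnil]
      · have hkK : k ∈ K := by
          rcases List.mem_append.mp hk with h | h
          · exact h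
          · exact absurd (List.mem_filter.mp h).1 hp
        have hm : pvMatch lc k name = false := by
          cases hx : pvMatch lc k name
          · rfl
          · exact absurd ((pv_mem_pvPrefs lc name k).mpr ⟨hKne k hkK, hx⟩) hp
        simp [hp, hm]
    have hinit : K'.map (fun k => ((k : String), (Sum.inl (if k ∈ pvPrefs lc name then
          (if k ∈ K then done.filter (fun n => pvMatch lc k n) ++ [name] else [name])
          else done.filter (fun n => pvMatch lc k n)) : List String ⊕ String)))
        = K'.map (fun k => (k, Sum.inl ((done ++ [name]).filter (fun n => pvMatch lc k n)))) := by
      apply List.map_congr_left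
      intro k hk
      rw [hvals k hk]
    rw [hinit, ih K' (done ++ [name]) hKp hne hout']
    rw [List.append_assoc]
    rfl

-- A's second phase: folding the snapshot over the dict rewrites each entry in place
lemma pv_phase2 : ∀ (suf pre : List (String × (List String ⊕ String))),
    ((pre ++ suf).map (·.1)).Nodup →
    List.foldl pvStep2 (PySem.Dict.mk (pre ++ suf)) suf
      = PySem.Dict.mk (pre ++ suf.flatMap pvTr) := by
  intro suf
  induction suf with
  | nil => intro pre _; simp
  | cons nv suf ih =>
    intro pre hnd
    obtain ⟨n, v⟩ := nv
    have hnd' : (pre.map Prod.fst ++ n :: suf.map Prod.fst).Nodup := by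
      simpa using hnd
    have h1 := List.nodup_append.mp hnd'
    have hpre : ∀ q ∈ pre, q.1 ≠ n := by
      intro q hq he
      exact h1.2.2 n (List.mem_map.mpr ⟨q, hq, he⟩) n List.mem_cons_self rfl
    have hsuf : ∀ q ∈ suf, q.1 ≠ n := by
      intro q hq he
      exact (List.nodup_cons.mp h1.2.1).1 (he ▸ List.mem_map.mpr ⟨q, hq, rfl⟩)
    rw [List.foldl_cons]
    cases v with
    | inr s0 =>
      have hstep : pvStep2 (PySem.Dict.mk (pre ++ (n, Sum.inr s0) :: suf)) (n, Sum.inr s0)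
          = PySem.Dict.mk (pre ++ (n, Sum.inr s0) :: suf) := rfl
      rw [hstep]
      have hre : pre ++ (n, Sum.inr s0) :: suf = (pre ++ [(n, Sum.inr s0)]) ++ suf := by simp
      have hnd2 : (((pre ++ [(n, Sum.inr s0)]) ++ suf).map Prod.fst).Nodup := by
        simpa using hnd'
      rw [hre, ih (pre ++ [(n, Sum.inr s0)]) hnd2]
      simp [pvTr]
    | inl lst =>
      cases hbad : lst.any (fun fn => ! PySem.Str.startswith fn
          ((PySem.List.min? lst (fun s => PySem.Str.len s)).getD "")) with
      | true =>
        have hstep : pvStep2 (PySem.Dict.mk (pre ++ (n, Sum.inl lst) :: suf)) (n, Sum.inl lst)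
            = (PySem.Dict.mk (pre ++ (n, Sum.inl lst) :: suf)).erase n := by
          simp only [pvStep2, hbad, if_true]
        have herase : (PySem.Dict.mk (pre ++ (n, Sum.inl lst) :: suf)).erase n
            = PySem.Dict.mk (pre ++ suf) := by
          simp only [PySem.Dict.erase]
          congr 1
          rw [List.filter_append, List.filter_cons]
          have e1 : pre.filter (fun p => !(p.1 == n)) = pre :=
            List.filter_eq_self.mpr (fun q hq => by simpa using hpre q hq)
          have e2 : suf.filter (fun p => !(p.1 == n)) = suf :=
            List.filter_eq_self.mpr (fun q hq => by simpa using hsuf q hq)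
          simp [e1, e2]
        have hnd2 : ((pre ++ suf).map Prod.fst).Nodup := by
          refine List.Nodup.sublist ?_ hnd'
          rw [List.map_append]
          exact List.Sublist.append_left (List.sublist_cons_self _ _) _
        have htr : pvTr (n, Sum.inl lst) = [] := by
          simp only [pvTr]
          rw [if_pos hbad]
        rw [hstep, herase, ih pre hnd2, List.flatMap_cons, htr]
        simp
      | false =>
        have hcont : (PySem.Dict.mk (pre ++ (n, Sum.inl lst) :: suf)).contains n = true := by
          simp only [PySem.Dict.contains, PySem.Dict.items]
          rw [List.any_eq_true]
          exact ⟨(n, Sum.inl lst), by simp, by simp⟩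
        have hstep : pvStep2 (PySem.Dict.mk (pre ++ (n, Sum.inl lst) :: suf)) (n, Sum.inl lst)
            = PySem.Dict.mk (pre ++ (n, Sum.inr ((PySem.List.min? lst
                (fun s => PySem.Str.len s)).getD "")) :: suf) := by
          simp only [pvStep2, hbad, if_false, hcont, if_true, Bool.false_eq_true]
          rw [PySem.Dict.insert, if_pos hcont]
          congr 1
          rw [List.map_append, List.map_cons]
          congr 1
          · have hid : ∀ q ∈ pre, (if (q.1 == n) = true
                then ((n, Sum.inr ((PySem.List.min? lst (fun s => PySem.Str.len s)).getD ""))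
                  : String × (List String ⊕ String)) else q) = q := by
              intro q hq
              simp [hpre q hq]
            exact (List.map_congr_left hid).trans (List.map_id _)
          · congr 1
            · simp
            · have hid : ∀ q ∈ suf, (if (q.1 == n) = true
                  then ((n, Sum.inr ((PySem.List.min? lst (fun s => PySem.Str.len s)).getD ""))
                    : String × (List String ⊕ String)) else q) = q := by
                intro q hq
                simp [hsuf q hq]
              exact (List.map_congr_left hid).trans (List.map_id _)
        rw [hstep]
        have hre : pre ++ (n, Sum.inr ((PySem.List.min? lst (fun s => PySem.Str.len s)).getD ""))
              :: suf
            = (pre ++ [(n, Sum.inr ((PySem.List.min? lst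
                (fun s => PySem.Str.len s)).getD ""))]) ++ suf := by simp
        have hnd2 : (((pre ++ [(n, Sum.inr ((PySem.List.min? lst
              (fun s => PySem.Str.len s)).getD ""))]) ++ suf).map Prod.fst).Nodup := by
          simpa using hnd'
        have htr : pvTr (n, Sum.inl lst)
            = [(n, Sum.inr ((PySem.List.min? lst (fun s => PySem.Str.len s)).getD ""))] := by
          simp only [pvTr]
          rw [if_neg (by rw [hbad]; simp)]
        rw [hre, ih _ hnd2, List.flatMap_cons, htr]
        simp

-- B's final comprehension loop in closed form
lemma pv_table_fold (c : String → Prop) [DecidablePred c] (s : String → String) :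
    ∀ (K : List String) (d : PySem.Dict String String), K.Nodup →
    (∀ k ∈ K, d.contains k = false) →
    (List.foldl (fun t k => if c k then t else t.insert k (s k)) d K).items
      = d.items ++ K.flatMap (fun k => if c k then [] else [(k, s k)]) := by
  intro K
  induction K with
  | nil => intro d _ _; simp
  | cons k K ih =>
    intro d hnd hfree
    have hkK : k ∉ K := (List.nodup_cons.mp hnd).1
    have hK : K.Nodup := (List.nodup_cons.mp hnd).2
    rw [List.foldl_cons, List.flatMap_cons]
    by_cases hc : c k
    · rw [if_pos hc, if_pos hc]
      rw [ih _ hK (fun k' hk' => hfree k' (List.mem_cons_of_mem _ hk'))]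
      simp
    · rw [if_neg hc, if_neg hc]
      have hfree' : ∀ k' ∈ K, (d.insert k (s k)).contains k' = false := by
        intro k' hk'
        rw [PySem.Dict.contains_insert]
        have : k' ≠ k := fun h => hkK (h ▸ hk')
        simp [this, hfree k' (List.mem_cons_of_mem _ hk')]
      rw [ih _ hK hfree']
      rw [PySem.Dict.items_insert_of_not_contains _ _ (hfree k List.mem_cons_self)]
      simp

-- A's first phase, rewritten as a fold over the prefix lists
lemma pv_funA (lowercase : Bool) (a : PySem.Dict String (List String ⊕ String)) (name : String) :
    (PySem.List.pyRange 1 (PySem.Str.len name + 1) 1).foldl (fun a i =>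
        let aname := PySem.Str.slice name none (some i)
        let aname := if lowercase then PySem.Str.lower aname else aname
        if a.contains aname then
          a.modify aname (Sum.inl []) (fun v => match v with
            | Sum.inl l => Sum.inl (l ++ [name])
            | Sum.inr s => Sum.inr s)
        else a.insert aname (Sum.inl [name])) a
      = List.foldl (pvStepA name) a (pvPrefs lowercase name) := by
  rw [pvPrefs, List.foldl_map]
  apply PySem.List.foldl_congr_mem
  intro acc i hi
  rw [PySem.List.mem_pyRange_one] at hi
  have h0 : (0:Int) ≤ i := by omega
  show pvStepA name acc (if lowercase then PySem.Str.lower (PySem.Str.slice name none (some i))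
      else PySem.Str.slice name none (some i))
    = pvStepA name acc (PySem.Str.slice (pvNorm lowercase name) none (some i))
  congr 1
  cases lowercase with
  | false => simp [pvNorm]
  | true => simp [pvNorm, pv_slice_lower_comm name i h0]

-- B-side helpers: the streaming-minimum step, its closed form, and the bad-key set
def pvStepBmin (name : String) (d : PySem.Dict String String) (p : String) :
    PySem.Dict String String :=
  match d.get? p with
  | none => d.insert p name
  | some s => if PySem.Str.len name < PySem.Str.len s then d.insert p name else d

def pvMin (l : List String) : String := (PySem.List.min? l (fun s => PySem.Str.len s)).getD ""

def pvStepBad (sd : PySem.Dict String String) (name : String) (b : PySem.Set String)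
    (p : String) : PySem.Set String :=
  if ! PySem.Str.startswith name ((sd.get? p).getD "") then PySem.Set.add b p else b

lemma pv_get?_mk_map_mem {β : Type} (K : List String) (g : String → β) (p : String)
    (hp : p ∈ K) (hnd : K.Nodup) :
    (PySem.Dict.mk (K.map (fun k => (k, g k)))).get? p = some (g p) := by
  apply PySem.Dict.get?_of_mem_items
  · exact List.mem_map.mpr ⟨p, hp, rfl⟩
  · rw [pv_keys_mk_map]; exact hnd

lemma pv_get?_mk_map_not {β : Type} (K : List String) (g : String → β) (p : String)
    (hp : p ∉ K) :
    (PySem.Dict.mk (K.map (fun k => (k, g k)))).get? p = none := by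
  rw [PySem.Dict.get?_eq_none_iff_not_mem_keys, pv_keys_mk_map]
  exact hp

lemma pv_min_append (l : List String) (x : String) (h : l ≠ []) :
    pvMin (l ++ [x]) = if PySem.Str.len x < PySem.Str.len (pvMin l) then x else pvMin l := by
  obtain ⟨m, hm⟩ : ∃ m, PySem.List.min? l (fun s => PySem.Str.len s) = some m := by
    cases h2 : PySem.List.min? l (fun s => PySem.Str.len s) with
    | none => exact absurd ((PySem.List.min?_eq_none_iff _ _).mp h2) h
    | some m => exact ⟨m, rfl⟩
  simp only [pvMin, hm, Option.getD_some]
  simp only [PySem.List.min?] at hm ⊢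
  rw [List.foldl_append, hm]
  simp only [List.foldl_cons, List.foldl_nil]
  show (if PySem.Str.len x < PySem.Str.len m then some x else some m).getD "" = _
  split <;> rfl

-- inner loop of B's first pass over the prefix list of one name
lemma pv_innerB (name : String) : ∀ (ps K : List String) (vals : String → String),
    ps.Nodup → K.Nodup →
    List.foldl (pvStepBmin name) (PySem.Dict.mk (K.map (fun k => (k, vals k)))) ps
      = PySem.Dict.mk ((K ++ ps.filter (fun p => p ∉ K)).map (fun k =>
          (k, if k ∈ ps then (if k ∈ K then
                (if PySem.Str.len name < PySem.Str.len (vals k) then name else vals k)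
              else name) else vals k))) := by
  intro ps
  induction ps with
  | nil => intro K vals _ _; simp
  | cons p ps ih =>
    intro K vals hnd hK
    have hpps : p ∉ ps := (List.nodup_cons.mp hnd).1
    have hps : ps.Nodup := (List.nodup_cons.mp hnd).2
    rw [List.foldl_cons]
    by_cases hpK : p ∈ K
    · have hget := pv_get?_mk_map_mem K vals p hpK hK
      have hstep : pvStepBmin name (PySem.Dict.mk (K.map (fun k => (k, vals k)))) p
          = PySem.Dict.mk (K.map (fun k =>
              (k, if k = p then (if PySem.Str.len name < PySem.Str.len (vals p) then name
                  else vals k) else vals k))) := by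
        rw [pvStepBmin, hget]
        show (if PySem.Str.len name < PySem.Str.len (vals p)
            then (PySem.Dict.mk (K.map (fun k => (k, vals k)))).insert p name
            else PySem.Dict.mk (K.map (fun k => (k, vals k)))) = _
        by_cases hlt : PySem.Str.len name < PySem.Str.len (vals p)
        · simp only [hlt, if_true]
          have hc : (PySem.Dict.mk (K.map (fun k => (k, vals k)))).contains p = true := by
            rw [pv_contains_mk_map]; exact decide_eq_true hpK
          rw [PySem.Dict.insert, if_pos hc]
          congr 1
          rw [List.map_map]
          apply List.map_congr_left
          intro k hk
          by_cases hkp : k = p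
          · subst hkp; simp [hlt]
          · simp [hkp]
        · simp only [hlt, if_false]
          congr 1
          apply List.map_congr_left
          intro k hk
          by_cases hkp : k = p
          · subst hkp; simp [hlt]
          · simp [hkp]
      rw [hstep, ih K _ hps hK]
      congr 1
      have hfil : (List.filter (fun q => decide (q ∉ K)) (p :: ps))
          = List.filter (fun q => decide (q ∉ K)) ps := by
        rw [List.filter_cons]
        simp [hpK]
      rw [hfil]
      apply List.map_congr_left
      intro k hk
      by_cases hkp : k = p
      · subst hkp
        simp [hpps, hpK]
      · simp only [List.mem_cons, hkp, false_or]
        by_cases hkps : k ∈ ps <;> simp [hkps, hkp]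
    · have hget := pv_get?_mk_map_not K vals p hpK
      have hc : (PySem.Dict.mk (K.map (fun k => (k, vals k)))).contains p = false := by
        rw [pv_contains_mk_map]; exact decide_eq_false hpK
      have hKp : (K ++ [p]).Nodup := by
        rw [List.nodup_append]
        refine ⟨hK, List.nodup_singleton p, ?_⟩
        intro a ha b hb
        simp only [List.mem_singleton] at hb
        subst hb
        exact fun h => hpK (h ▸ ha)
      have hstep : pvStepBmin name (PySem.Dict.mk (K.map (fun k => (k, vals k)))) p
          = PySem.Dict.mk ((K ++ [p]).map (fun k =>
              (k, if k = p then name else vals k))) := by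
        rw [pvStepBmin, hget]
        show (PySem.Dict.mk (K.map (fun k => (k, vals k)))).insert p name = _
        rw [PySem.Dict.insert, if_neg (by simp [hc])]
        congr 1
        rw [List.map_append]
        congr 1
        · apply List.map_congr_left
          intro k hk
          have : k ≠ p := fun h => hpK (h ▸ hk)
          simp [this]
        · simp
      rw [hstep, ih (K ++ [p]) _ hps hKp]
      congr 1
      have hfil : (List.filter (fun q => decide (q ∉ K)) (p :: ps))
          = p :: List.filter (fun q => decide (q ∉ K)) ps := by
        rw [List.filter_cons]
        simp [hpK]
      have hfil2 : List.filter (fun q => decide (q ∉ K ++ [p])) ps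
          = List.filter (fun q => decide (q ∉ K)) ps := by
        apply List.filter_congr
        intro q hq
        have : q ≠ p := fun h => hpps (h ▸ hq)
        simp [this]
      rw [hfil, hfil2, List.append_assoc, List.singleton_append]
      apply List.map_congr_left
      intro k hk
      by_cases hkp : k = p
      · subst hkp
        simp [hpps, hpK]
      · have hkK : (k ∈ K ++ [p]) ↔ k ∈ K := by simp [hkp]
        simp only [List.mem_cons, hkp, false_or, hkK]
        by_cases hkps : k ∈ ps <;> simp [hkps, hkp]

-- outer loop of B's first pass: the dict maps each key to the shortest matching name so far
lemma pv_outerB (lc : Bool) : ∀ (rest K done : List String),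
    K.Nodup → (∀ k ∈ K, k ≠ "") →
    (∀ k, k ≠ "" → k ∉ K → ∀ n ∈ done, pvMatch lc k n = false) →
    (∀ k ∈ K, done.filter (fun n => pvMatch lc k n) ≠ []) →
    List.foldl (fun d name => List.foldl (pvStepBmin name) d (pvPrefs lc name))
        (PySem.Dict.mk (K.map (fun k =>
          (k, pvMin (done.filter (fun n => pvMatch lc k n)))))) rest
      = PySem.Dict.mk ((pvKeys lc rest K).map (fun k =>
          (k, pvMin ((done ++ rest).filter (fun n => pvMatch lc k n))))) := by
  intro rest
  induction rest with
  | nil => intro K done _ _ _ _; simp [pvKeys]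
  | cons name rest ih =>
    intro K done hK hKne hout hne0
    rw [List.foldl_cons]
    rw [pv_innerB name (pvPrefs lc name) K _ (pv_nodup_pvPrefs lc name) hK]
    have hstep : pvKeys lc (name :: rest) K = pvKeys lc rest (K ++ (pvPrefs lc name).filter (fun p => p ∉ K)) := by
      rw [pvKeys, List.foldl_cons, pv_add_fold _ _ (pv_nodup_pvPrefs lc name)]
      rfl
    rw [hstep]
    set K' := K ++ (pvPrefs lc name).filter (fun p => p ∉ K) with hK'
    have hKp : K'.Nodup := by
      rw [hK', List.nodup_append]
      refine ⟨hK, List.Nodup.filter _ (pv_nodup_pvPrefs lc name), ?_⟩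
      intro a ha b hb
      rcases List.mem_filter.mp hb with ⟨_, hb2⟩
      intro he; subst he
      exact absurd ha (by simpa using hb2)
    have hne : ∀ k ∈ K', k ≠ "" := by
      intro k hk
      rcases List.mem_append.mp hk with h | h
      · exact hKne k h
      · exact ((pv_mem_pvPrefs lc name k).mp (List.mem_filter.mp h).1).1
    have hout' : ∀ k, k ≠ "" → k ∉ K' → ∀ n ∈ done ++ [name], pvMatch lc k n = false := by
      intro k hkne hkK n hn
      have hkK0 : k ∉ K := fun h => hkK (List.mem_append_left _ h)
      rcases List.mem_append.mp hn with h | h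
      · exact hout k hkne hkK0 n h
      · simp only [List.mem_singleton] at h
        by_contra hm
        have hm' : pvMatch lc k name = true := by
          rw [← h]
          cases hx : pvMatch lc k n
          · exact absurd hx hm
          · rfl
        exact hkK (List.mem_append_right _ (List.mem_filter.mpr
          ⟨(pv_mem_pvPrefs lc name k).mpr ⟨hkne, hm'⟩, by simpa using hkK0⟩))
    have hne0' : ∀ k ∈ K', (done ++ [name]).filter (fun n => pvMatch lc k n) ≠ [] := by
      intro k hk
      rw [List.filter_append]
      rcases List.mem_append.mp hk with h | h
      · intro hcon
        exact hne0 k h (List.append_eq_nil_iff.mp hcon).1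
      · have hm : pvMatch lc k name = true :=
          ((pv_mem_pvPrefs lc name k).mp (List.mem_filter.mp h).1).2
        intro hcon
        have := (List.append_eq_nil_iff.mp hcon).2
        simp [hm] at this
    have hvals : ∀ k ∈ K', (if k ∈ pvPrefs lc name then (if k ∈ K then
          (if PySem.Str.len name < PySem.Str.len (pvMin (done.filter (fun n => pvMatch lc k n)))
            then name else pvMin (done.filter (fun n => pvMatch lc k n)))
          else name) else pvMin (done.filter (fun n => pvMatch lc k n)))
        = pvMin ((done ++ [name]).filter (fun n => pvMatch lc k n)) := by
      intro k hk
      rw [List.filter_append]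
      by_cases hp : k ∈ pvPrefs lc name
      · have hm : pvMatch lc k name = true := ((pv_mem_pvPrefs lc name k).mp hp).2
        rw [if_pos hp]
        have hsing : List.filter (fun n => pvMatch lc k n) [name] = [name] := by
          simp [hm]
        rw [hsing]
        by_cases hkK : k ∈ K
        · rw [if_pos hkK, pv_min_append _ _ (hne0 k hkK)]
        · have hkne : k ≠ "" := ((pv_mem_pvPrefs lc name k).mp hp).1
          have hnil : done.filter (fun n => pvMatch lc k n) = [] := by
            rw [List.filter_eq_nil_iff]
            intro n hn
            simp [hout k hkne hkK n hn]
          rw [if_neg hkK, hnil, List.nil_append]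
          rfl
      · have hkK : k ∈ K := by
          rcases List.mem_append.mp hk with h | h
          · exact h
          · exact absurd (List.mem_filter.mp h).1 hp
        have hm : pvMatch lc k name = false := by
          cases hx : pvMatch lc k name
          · rfl
          · exact absurd ((pv_mem_pvPrefs lc name k).mpr ⟨hKne k hkK, hx⟩) hp
        simp [hp, hm]
    have hinit : K'.map (fun k => ((k : String), (if k ∈ pvPrefs lc name then (if k ∈ K then
          (if PySem.Str.len name < PySem.Str.len (pvMin (done.filter (fun n => pvMatch lc k n)))
            then name else pvMin (done.filter (fun n => pvMatch lc k n)))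
          else name) else pvMin (done.filter (fun n => pvMatch lc k n)))))
        = K'.map (fun k => (k, pvMin ((done ++ [name]).filter (fun n => pvMatch lc k n)))) := by
      apply List.map_congr_left
      intro k hk
      rw [hvals k hk]
    rw [hinit, ih K' (done ++ [name]) hKp hne hout' hne0']
    rw [List.append_assoc]
    rfl

-- membership in the bad-key set, inner loop
lemma pv_bad_inner (sd : PySem.Dict String String) (name : String) :
    ∀ (ps : List String) (b : PySem.Set String) (x : String),
    (x ∈ List.foldl (pvStepBad sd name) b ps)
      ↔ x ∈ b ∨ (x ∈ ps ∧ PySem.Str.startswith name ((sd.get? x).getD "") = false) := by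
  intro ps
  induction ps with
  | nil => intro b x; simp
  | cons p ps ih =>
    intro b x
    rw [List.foldl_cons]
    cases hc : PySem.Str.startswith name ((sd.get? p).getD "") with
    | false =>
      have hstep : pvStepBad sd name b p = PySem.Set.add b p := by
        rw [pvStepBad, if_pos (by rw [hc]; rfl)]
      rw [hstep, ih]
      constructor
      · rintro (hb | ⟨h1, h2⟩)
        · rcases (PySem.Set.mem_add b p x).mp hb with h | h
          · exact Or.inl h
          · exact Or.inr ⟨by simp [h], by rw [h]; exact hc⟩
        · exact Or.inr ⟨List.mem_cons_of_mem _ h1, h2⟩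
      · rintro (hb | ⟨h1, h2⟩)
        · exact Or.inl ((PySem.Set.mem_add b p x).mpr (Or.inl hb))
        · rcases List.mem_cons.mp h1 with h | h
          · exact Or.inl ((PySem.Set.mem_add b p x).mpr (Or.inr h))
          · exact Or.inr ⟨h, h2⟩
    | true =>
      have hstep : pvStepBad sd name b p = b := by
        rw [pvStepBad, if_neg (by rw [hc]; simp)]
      rw [hstep, ih]
      constructor
      · rintro (hb | ⟨h1, h2⟩)
        · exact Or.inl hb
        · exact Or.inr ⟨List.mem_cons_of_mem _ h1, h2⟩
      · rintro (hb | ⟨h1, h2⟩)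
        · exact Or.inl hb
        · rcases List.mem_cons.mp h1 with h | h
          · rw [h] at h2
            rw [h2] at hc
            cases hc
          · exact Or.inr ⟨h, h2⟩

-- membership in the bad-key set, outer loop
lemma pv_bad_outer (lc : Bool) (sd : PySem.Dict String String) :
    ∀ (ns : List String) (b : PySem.Set String) (x : String),
    (x ∈ List.foldl (fun b name => List.foldl (pvStepBad sd name) b (pvPrefs lc name)) b ns)
      ↔ x ∈ b ∨ ∃ n ∈ ns, x ∈ pvPrefs lc n
          ∧ PySem.Str.startswith n ((sd.get? x).getD "") = false := by
  intro ns
  induction ns with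
  | nil => intro b x; simp
  | cons name ns ih =>
    intro b x
    rw [List.foldl_cons, ih, pv_bad_inner]
    constructor
    · rintro ((hb | ⟨h1, h2⟩) | ⟨n, hn, h1, h2⟩)
      · exact Or.inl hb
      · exact Or.inr ⟨name, List.mem_cons_self, h1, h2⟩
      · exact Or.inr ⟨n, List.mem_cons_of_mem _ hn, h1, h2⟩
    · rintro (hb | ⟨n, hn, h1, h2⟩)
      · exact Or.inl (Or.inl hb)
      · rcases List.mem_cons.mp hn with h | h
        · subst h
          exact Or.inl (Or.inr ⟨h1, h2⟩)
        · exact Or.inr ⟨n, h, h1, h2⟩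

-- B's first pass, rewritten as a fold over the prefix lists
lemma pv_funBmin (lowercase : Bool) (d : PySem.Dict String String) (name : String) :
    (let nn := if lowercase then PySem.Str.lower name else name
     (PySem.List.pyRange 1 (PySem.Str.len nn + 1) 1).foldl (fun d i =>
        let p := PySem.Str.slice nn none (some i)
        match d.get? p with
        | none => d.insert p name
        | some s =>
          if PySem.Str.len name < PySem.Str.len s then d.insert p name
          else d) d)
      = List.foldl (pvStepBmin name) d (pvPrefs lowercase name) := by
  show (PySem.List.pyRange 1 (PySem.Str.len (pvNorm lowercase name) + 1) 1).foldl (fun d i =>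
      pvStepBmin name d (PySem.Str.slice (pvNorm lowercase name) none (some i))) d = _
  rw [pvPrefs, List.foldl_map, pv_len_norm]

-- B's second pass, rewritten likewise
lemma pv_funBbad (lowercase : Bool) (sd : PySem.Dict String String) (b : PySem.Set String)
    (name : String) :
    (let nn := if lowercase then PySem.Str.lower name else name
     (PySem.List.pyRange 1 (PySem.Str.len nn + 1) 1).foldl (fun b i =>
        let p := PySem.Str.slice nn none (some i)
        if ! PySem.Str.startswith name ((sd.get? p).getD "") then PySem.Set.add b p
        else b) b)
      = List.foldl (pvStepBad sd name) b (pvPrefs lowercase name) := by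
  show (PySem.List.pyRange 1 (PySem.Str.len (pvNorm lowercase name) + 1) 1).foldl (fun b i =>
      pvStepBad sd name b (PySem.Str.slice (pvNorm lowercase name) none (some i))) b = _
  rw [pvPrefs, List.foldl_map, pv_len_norm]

-- ===== VERDICT (by name: the statement is the Claim_ definition above) =====
theorem abbreviation_table_spec : Claim_equal_abbreviation_table := by
  intro names lowercase _
  unfold Spec_abbreviation_table
  unfold abbreviation_table abbreviation_table_alt
  simp only [pv_funA, pv_funBmin, pv_funBbad]
  have hK0 := pv_keys_invariant lowercase names [] List.nodup_nil (by intro k hk; cases hk)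
  obtain ⟨hKnd, hKne, -⟩ := hK0
  have hfirst : List.foldl (fun a name => List.foldl (pvStepA name) a (pvPrefs lowercase name))
        PySem.Dict.empty names
      = PySem.Dict.mk ((pvKeys lowercase names []).map (fun k =>
          (k, Sum.inl (names.filter (fun n => pvMatch lowercase k n))))) := by
    have h := pv_outer lowercase names [] [] List.nodup_nil
      (by intro k hk; cases hk) (by intro k _ _ n hn; cases hn)
    simpa using h
  have hfirstB : List.foldl (fun d name => List.foldl (pvStepBmin name) d (pvPrefs lowercase name))
        PySem.Dict.empty names
      = PySem.Dict.mk ((pvKeys lowercase names []).map (fun k =>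
          (k, pvMin (names.filter (fun n => pvMatch lowercase k n))))) := by
    have h := pv_outerB lowercase names [] [] List.nodup_nil
      (by intro k hk; cases hk) (by intro k _ _ n hn; cases hn) (by intro k hk; cases hk)
    simpa using h
  rw [hfirst, hfirstB]
  set K := pvKeys lowercase names [] with hKset
  set S := K.map (fun k =>
      ((k : String), (Sum.inl (names.filter (fun n => pvMatch lowercase k n)) : List String ⊕ String)))
    with hSset
  set sdD := PySem.Dict.mk (K.map (fun k =>
      (k, pvMin (names.filter (fun n => pvMatch lowercase k n))))) with hsdD
  have hSnd : (([] ++ S).map (fun p : String × (List String ⊕ String) => p.1)).Nodup := by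
    rw [List.nil_append, hSset, List.map_map]
    simpa [Function.comp_def] using hKnd
  have hphase2 : List.foldl pvStep2 (PySem.Dict.mk S) S = PySem.Dict.mk (S.flatMap pvTr) := by
    have h := pv_phase2 S [] hSnd
    simpa using h
  show (List.foldl pvStep2 (PySem.Dict.mk S) S).items.filterMap (fun p =>
      match p.2 with
      | Sum.inl _ => none
      | Sum.inr s => some (p.1, s)) = _
  rw [hphase2]
  show (S.flatMap pvTr).filterMap _ = _
  rw [List.filterMap_flatMap, hSset, List.flatMap_map]
  -- name B's bad-key set
  set bad := List.foldl (fun b name => List.foldl (pvStepBad sdD name) b (pvPrefs lowercase name))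
      (PySem.Set.ofList []) names with hbad
  -- B's final comprehension over sdD.items
  show _ = (List.foldl (fun (t : PySem.Dict String String) kv =>
      if kv.1 ∈ bad then t else t.insert kv.1 kv.2) PySem.Dict.empty
      (K.map (fun k => (k, pvMin (names.filter (fun n => pvMatch lowercase k n)))))).items
  rw [List.foldl_map]
  rw [show (fun (t : PySem.Dict String String) (k : String) =>
        if ((k, pvMin (names.filter (fun n => pvMatch lowercase k n))).1 ∈ bad) then t
        else t.insert (k, pvMin (names.filter (fun n => pvMatch lowercase k n))).1
          (k, pvMin (names.filter (fun n => pvMatch lowercase k n))).2)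
      = (fun (t : PySem.Dict String String) (k : String) =>
        if (k ∈ bad) then t
        else t.insert k (pvMin (names.filter (fun n => pvMatch lowercase k n)))) from rfl]
  rw [pv_table_fold (fun k => k ∈ bad)
    (fun k => pvMin (names.filter (fun n => pvMatch lowercase k n))) K PySem.Dict.empty hKnd
    (by intro k _; simp [PySem.Dict.contains, PySem.Dict.empty])]
  rw [show (PySem.Dict.empty : PySem.Dict String String).items = [] from rfl, List.nil_append]
  apply List.flatMap_congr ?_
  intro k hk
  set g := List.filter (fun n => pvMatch lowercase k n) names with hg
  have hin : sdD.get? k = some (pvMin g) := by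
    rw [hsdD]
    exact pv_get?_mk_map_mem K _ k hk hKnd
  have hbadiff : (k ∈ bad) ↔ ((g.any (fun fn => ! PySem.Str.startswith fn (pvMin g))) = true) := by
    rw [hbad, pv_bad_outer, hin]
    simp only [Option.getD_some, PySem.Set.mem_ofList, List.not_mem_nil, false_or]
    rw [List.any_eq_true]
    constructor
    · rintro ⟨n, hn, h1, h2⟩
      have hm : pvMatch lowercase k n = true := ((pv_mem_pvPrefs lowercase n k).mp h1).2
      refine ⟨n, List.mem_filter.mpr ⟨hn, hm⟩, ?_⟩
      simpa using h2
    · rintro ⟨n, hn, h2⟩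
      obtain ⟨hn1, hn2⟩ := List.mem_filter.mp hn
      refine ⟨n, hn1, (pv_mem_pvPrefs lowercase n k).mpr ⟨hKne k hk, hn2⟩, ?_⟩
      simpa using h2
  simp only [pvTr]
  cases hany : g.any (fun fn => ! PySem.Str.startswith fn (pvMin g)) with
  | true =>
    rw [if_pos (by
      show (g.any (fun fn => ! PySem.Str.startswith fn
        ((PySem.List.min? g (fun s => PySem.Str.len s)).getD ""))) = true
      exact hany)]
    rw [if_pos (hbadiff.mpr hany)]
    rfl
  | false =>
    rw [if_neg (by
      show ¬ (g.any (fun fn => ! PySem.Str.startswith fn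
        ((PySem.List.min? g (fun s => PySem.Str.len s)).getD ""))) = true
      rw [show ((PySem.List.min? g (fun s => PySem.Str.len s)).getD "") = pvMin g from rfl]
      rw [hany]
      simp)]
    rw [if_neg (by
      rw [hbadiff, hany]
      simp)]
    rfl
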